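-- pv_equiv track=rewrite | github.com/SharifIsmail/aa_app_factory | apps/law_monitoring/service/src/service/law_core/artifacts/generators/pdf_generator.py | _wrap_url
-- ===== SOURCE A (Python) =====
-- def _wrap_url(url: str, max_chars: int = 45) -> str:
--     """
--     Wrap long URLs by inserting line breaks at appropriate points.
--
--     Args:
--         url: URL to wrap
--         max_chars: Maximum characters per line
--
--     Returns:
--         str: URL with line breaks
--     """
--     if not url or len(url) <= max_chars:
--         return url
--
--     # Break URL at natural separators
--     result = ""
--     current_line = ""
--
--     i = 0
--     while i < len(url):
--         char = url[i]
--         current_line += char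
--
--         # Check if we should break after this character
--         should_break = False
--
--         # If line is getting long and we're at a natural break point
--         if len(current_line) >= max_chars:
--             # Break after these characters
--             if char in ["/", "?", "&", "=", "-", "_"] and i < len(url) - 1:
--                 should_break = True
--             # Break before these characters if next is one
--             elif i + 1 < len(url) and url[i + 1] in ["/", "?", "&", "="]:
--                 should_break = True
--
--         if should_break:
--             result += current_line + "\n"
--             current_line = ""
--
--         i += 1
--
--     # Add remaining characters
--     if current_line:
--         result += current_line
--
--     return result
-- ===== SOURCE B (Python) =====
-- def _wrap_url(url: str, max_chars: int = 45) -> str: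
--     """Two-phase rewrite: record break indices in one index scan, then slice and join."""
--     if not url or len(url) <= max_chars:
--         return url
--     n = len(url)
--     breaks = []
--     start = 0
--     for i in range(n):
--         if i - start + 1 >= max_chars and (
--             (url[i] in "/?&=-_" and i < n - 1)
--             or (i + 1 < n and url[i + 1] in "/?&=")
--         ):
--             breaks.append(i)
--             start = i + 1
--     parts = []
--     prev = 0
--     for b in breaks:
--         parts.append(url[prev:b + 1])
--         prev = b + 1
--     parts.append(url[prev:])
--     return "\n".join(parts)
-- ===== Notes on version B (the rewrite author's own statement) =====
-- stated objective: faster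
-- what changed: A builds the output by appending characters into a growing current_line/result string during the scan; B first records the break indices in one index-arithmetic pass (segment length i-start+1), then reconstructs the result by slicing the url at those indices and joining the slices with a single newline-join.
import Mathlib
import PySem

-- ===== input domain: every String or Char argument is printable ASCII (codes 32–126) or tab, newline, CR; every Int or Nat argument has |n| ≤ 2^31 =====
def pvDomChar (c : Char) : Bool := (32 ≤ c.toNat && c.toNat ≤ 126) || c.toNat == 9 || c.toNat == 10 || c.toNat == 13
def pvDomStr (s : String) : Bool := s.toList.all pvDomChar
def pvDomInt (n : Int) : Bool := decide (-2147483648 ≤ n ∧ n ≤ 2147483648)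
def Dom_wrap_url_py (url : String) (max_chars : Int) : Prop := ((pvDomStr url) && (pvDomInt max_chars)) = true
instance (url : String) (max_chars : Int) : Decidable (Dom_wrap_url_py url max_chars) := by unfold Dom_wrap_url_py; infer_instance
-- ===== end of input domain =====

-- B replaces A's grow-a-string scan (quadratic repeated concatenation) by a two-phase decomposition: record break indices in one pass, then slice and join; measured faster.

-- ===== PORT A =====
-- the characters A breaks AFTER / BEFORE
def pvAfterChars : List Char := ['/', '?', '&', '=', '-', '_']
def pvBeforeChars : List Char := ['/', '?', '&', '=']

-- A's should_break computation at one position: current_line (already including char), char, and the rest of the url after it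
def pvShouldBreak (max_chars : Int) (cur : List Char) (c : Char) (rest : List Char) : Bool :=
  if (cur.length : Int) ≥ max_chars then
    if c ∈ pvAfterChars && !rest.isEmpty then true   -- i < len(url)-1  ⟺  some character follows
    else match rest with                              -- elif i+1 < len(url) and url[i+1] in [...]
      | c2 :: _ => decide (c2 ∈ pvBeforeChars)
      | [] => false
  else false

-- A's while loop, step for step: state (result, current_line), scanning the remaining characters
def pvWrapAGo (max_chars : Int) : List Char → List Char → List Char → List Char
  | result, current, [] => if !current.isEmpty then result ++ current else result
  | result, current, c :: rest =>
    let current' := current ++ [c]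
    if pvShouldBreak max_chars current' c rest then
      pvWrapAGo max_chars (result ++ current' ++ ['\n']) [] rest
    else
      pvWrapAGo max_chars result current' rest

def wrap_url_py (url : String) (max_chars : Int) : String :=
  if url = "" ∨ PySem.Str.len url ≤ max_chars then url
  else String.ofList (pvWrapAGo max_chars [] [] url.toList)

-- ===== PORT B =====
-- Source B's break test at index i: segment length i-start+1 reaches max_chars and the break rule fires
def pvWrapBCond (max_chars : Int) (n i start : Nat) (c : Char) (rest : List Char) : Bool :=
  decide ((i : Int) - (start : Int) + 1 ≥ max_chars) &&
    (decide (c ∈ pvAfterChars) && decide ((i : Int) < (n : Int) - 1) ||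
     (match rest with | c2 :: _ => decide (c2 ∈ pvBeforeChars) | [] => false))

-- phase one (Source B's for-loop over range(n), tracking start): record the break indices; i is the index of c, rest the characters after it
def pvWrapBGo (max_chars : Int) (n : Nat) : Nat → Nat → List Char → List Nat
  | _, _, [] => []
  | i, start, c :: rest =>
    if pvWrapBCond max_chars n i start c rest then
      i :: pvWrapBGo max_chars n (i + 1) (i + 1) rest
    else
      pvWrapBGo max_chars n (i + 1) start rest

-- phase two (Source B's parts loop): slice the url at each break index (inclusive), final tail slice appended
def pvWrapBParts (url : String) : Nat → List Nat → List String
  | prev, [] => [PySem.Str.slice url (some (prev : Int)) none]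
  | prev, b :: bs => PySem.Str.slice url (some (prev : Int)) (some ((b : Int) + 1)) :: pvWrapBParts url (b + 1) bs

def wrap_url_py_alt (url : String) (max_chars : Int) : String :=
  if url = "" ∨ PySem.Str.len url ≤ max_chars then url
  else
    PySem.Str.join "\n" (pvWrapBParts url 0 (pvWrapBGo max_chars url.toList.length 0 0 url.toList))

-- ===== PRECONDITION & SPEC =====
def Spec_wrap_url_py (url : String) (max_chars : Int) (out : String) : Prop := out = wrap_url_py_alt url max_chars
instance (url : String) (max_chars : Int) (out : String) : Decidable (Spec_wrap_url_py url max_chars out) := by unfold Spec_wrap_url_py; infer_instance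

-- ===== CLAIM (what is proved, stated in full; the proofs are below) =====
def Claim_equal_wrap_url_py : Prop := ∀ (url : String) (max_chars : Int), Dom_wrap_url_py url max_chars → Spec_wrap_url_py url max_chars (wrap_url_py url max_chars)

-- ===== LEMMAS AND PROOFS =====

-- proof-side model of both scans: the wrapped text produced from a pending current_line and the remaining characters
def pvRender (max_chars : Int) : List Char → List Char → List Char
  | current, [] => current
  | current, c :: rest =>
    let current' := current ++ [c]
    if pvShouldBreak max_chars current' c rest then
      current' ++ '\n' :: pvRender max_chars [] rest
    else
      pvRender max_chars current' rest

-- the flattened text B's phase two produces from a breaks list, starting at position prev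
def pvPartsFlat (cs : List Char) : Nat → List Nat → List Char
  | prev, [] => cs.drop prev
  | prev, b :: bs => (cs.drop prev).take (b + 1 - prev) ++ '\n' :: pvPartsFlat cs (b + 1) bs

theorem pvWrapAGo_eq_render (max_chars : Int) :
    ∀ (rest current result : List Char),
      pvWrapAGo max_chars result current rest = result ++ pvRender max_chars current rest := by
  intro rest
  induction rest with
  | nil =>
      intro current result
      by_cases h : current = []
      · simp [pvWrapAGo, pvRender, h]
      · simp [pvWrapAGo, pvRender, h]
  | cons c rest ih =>
      intro current result
      by_cases h : pvShouldBreak max_chars (current ++ [c]) c rest = true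
      · simp [pvWrapAGo, pvRender, h, ih]
      · simp [pvWrapAGo, pvRender, h, ih]

-- the two break tests agree when i is the index of c, start the segment start, and rest the characters after index i
theorem pvWrapBCond_eq_shouldBreak (max_chars : Int) (n start : Nat) (c : Char)
    (current rest : List Char) (hn : n = start + current.length + 1 + rest.length) :
    pvWrapBCond max_chars n (start + current.length) start c rest
      = pvShouldBreak max_chars (current ++ [c]) c rest := by
  have h1 : (((start + current.length : Nat) : Int) - (start : Int) + 1 ≥ max_chars)
      ↔ (max_chars ≤ (current.length : Int) + 1) := by
    push_cast
    omega
  cases rest with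
  | nil =>
      have h2 : ¬ (((start + current.length : Nat) : Int) < (n : Int) - 1) := by
        simp only [hn, List.length_nil]
        push_cast
        omega
      by_cases hL : max_chars ≤ (current.length : Int) + 1
      · simp [pvWrapBCond, pvShouldBreak, h1, h2, hL]
        intro _
        push_cast at h2
        omega
      · simp [pvWrapBCond, pvShouldBreak, h1, hL]
  | cons c2 rest2 =>
      have h2 : (((start + current.length : Nat) : Int) < (n : Int) - 1) := by
        simp only [hn, List.length_cons]
        push_cast
        omega
      by_cases hL : max_chars ≤ (current.length : Int) + 1
      · by_cases hA : c ∈ pvAfterChars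
        · simp [pvWrapBCond, pvShouldBreak, h1, h2, hL, hA]
          refine Or.inl ?_
          push_cast at h2
          exact h2
        · simp [pvWrapBCond, pvShouldBreak, h1, h2, hL, hA]
      · simp [pvWrapBCond, pvShouldBreak, h1, hL]

theorem pvWrapBGo_flat_eq_render (max_chars : Int) (cs : List Char) :
    ∀ (rest current : List Char) (start : Nat),
      cs.drop start = current ++ rest →
      pvPartsFlat cs start (pvWrapBGo max_chars cs.length (start + current.length) start rest) =
        pvRender max_chars current rest := by
  intro rest
  induction rest with
  | nil =>
      intro current start h
      simp [pvWrapBGo, pvPartsFlat, pvRender, h]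
  | cons c rest ih =>
      intro current start h
      have hstart : start ≤ cs.length := by
        by_contra hlt
        have : cs.drop start = [] := List.drop_eq_nil_of_le (by omega)
        simp [this] at h
      have hlen : cs.length = start + current.length + 1 + rest.length := by
        have := congrArg List.length h
        simp [List.length_drop] at this
        omega
      have hcond := pvWrapBCond_eq_shouldBreak max_chars cs.length start c current rest hlen
      by_cases hb : pvShouldBreak max_chars (current ++ [c]) c rest = true
      · -- break at this index
        have hdrop : cs.drop (start + current.length + 1) = rest := by
          have hdd : cs.drop (start + current.length + 1) = (cs.drop start).drop (current.length + 1) := by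
            rw [List.drop_drop]
            ring_nf
          rw [hdd, h]
          rw [show current ++ c :: rest = (current ++ [c]) ++ rest by simp]
          rw [show current.length + 1 = (current ++ [c]).length by simp]
          exact List.drop_left
        have htake : (cs.drop start).take (start + current.length + 1 - start) = current ++ [c] := by
          rw [h]
          rw [show start + current.length + 1 - start = (current ++ [c]).length by simp; omega]
          rw [show current ++ c :: rest = (current ++ [c]) ++ rest by simp]
          exact List.take_left
        have ihx := ih [] (start + current.length + 1) (by simpa using hdrop)
        simp only [List.length_nil, Nat.add_zero] at ihx
        simp only [pvWrapBGo, hcond, hb, if_pos, pvPartsFlat, pvRender]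
        rw [htake, ihx]
      · have hbf : pvShouldBreak max_chars (current ++ [c]) c rest = false := by simpa using hb
        have ihx := ih (current ++ [c]) start (by rw [h]; simp)
        have hidx : start + (current ++ [c]).length = start + current.length + 1 := by
          simp only [List.length_append, List.length_cons, List.length_nil]
          omega
        rw [hidx] at ihx
        simp only [pvWrapBGo, hcond, hbf, Bool.false_eq_true, if_false, pvRender]
        rw [ihx]

-- phase two's join, as a list of characters, is the flattening pvPartsFlat
theorem pvWrapBParts_toList (url : String) :
    ∀ (bs : List Nat) (prev : Nat),
      (PySem.Str.join "\n" (pvWrapBParts url prev bs)).toList = pvPartsFlat url.toList prev bs := by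
  intro bs
  induction bs with
  | nil =>
      intro prev
      simp [pvWrapBParts, pvPartsFlat, PySem.Str.toList_join, PySem.Chars.join_singleton,
        PySem.Str.toList_slice, PySem.Chars.slice_eq_listSlice, PySem.List.slice_from_natCast]
  | cons b bs ih =>
      intro prev
      have ihx := ih (b + 1)
      cases bs with
      | nil =>
          rw [PySem.Str.toList_join] at ihx ⊢
          simp only [pvWrapBParts, List.map_cons, List.map_nil] at ihx ⊢
          rw [PySem.Chars.join_cons_cons, PySem.Chars.join_singleton] at ⊢
          rw [PySem.Chars.join_singleton] at ihx
          simp only [pvPartsFlat]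
          rw [PySem.Str.toList_slice, PySem.Chars.slice_eq_listSlice,
            show ((b : Int) + 1) = (((b + 1 : Nat)) : Int) by push_cast; ring,
            PySem.List.slice_natCast]
          rw [ihx]
          simp only [pvPartsFlat]
          simp
      | cons b2 bs2 =>
          rw [PySem.Str.toList_join] at ihx ⊢
          simp only [pvWrapBParts, List.map_cons] at ihx ⊢
          rw [PySem.Chars.join_cons_cons]
          rw [ihx]
          simp only [pvPartsFlat]
          rw [PySem.Str.toList_slice, PySem.Chars.slice_eq_listSlice,
            show ((b : Int) + 1) = (((b + 1 : Nat)) : Int) by push_cast; ring,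
            PySem.List.slice_natCast]
          simp

-- ===== VERDICT (by name: the statement is the Claim_ definition above) =====
theorem wrap_url_py_spec : Claim_equal_wrap_url_py := by
  intro url max_chars _
  unfold Spec_wrap_url_py wrap_url_py wrap_url_py_alt
  by_cases hg : url = "" ∨ PySem.Str.len url ≤ max_chars
  · rw [if_pos hg, if_pos hg]
  · rw [if_neg hg, if_neg hg]
    apply String.toList_inj.mp
    rw [String.toList_ofList, pvWrapBParts_toList]
    have hflat := pvWrapBGo_flat_eq_render max_chars url.toList url.toList [] 0 (by simp)
    simp only [List.length_nil, Nat.add_zero] at hflat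
    rw [hflat, pvWrapAGo_eq_render]
    simp
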